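-- pv_equiv track=rewrite | github.com/nitugabriela/Bioinformatics | Project_L10/L10/ex2.py | make_count_matrix
-- ===== SOURCE A (Python) =====
-- from typing import Dict, List, Tuple, Optional
--
-- BASES = "ACGT"
--
-- def make_count_matrix(motifs: List[str]) -> Dict[str, List[int]]:
--     L = len(motifs[0])
--     counts = {b: [0] * L for b in BASES}
--     for m in motifs:
--         if len(m) != L:
--             raise ValueError("All motifs must have same length")
--         for j, ch in enumerate(m):
--             if ch not in BASES:
--                 raise ValueError(f"Invalid base {ch} in motif {m}")
--             counts[ch][j] += 1
--     return counts
-- ===== SOURCE B (Python) =====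
-- BASES = "ACGT"
--
-- def make_count_matrix(motifs):
--     # Pass 1: validation only, in A's exact order (same exceptions, same messages).
--     L = len(motifs[0])
--     for m in motifs:
--         if len(m) != L:
--             raise ValueError("All motifs must have same length")
--         for ch in m:
--             if ch not in BASES:
--                 raise ValueError(f"Invalid base {ch} in motif {m}")
--     # Pass 2: build the matrix column-wise: entry (b, j) = how often b occurs in column j.
--     cols = [[m[j] for m in motifs] for j in range(L)]
--     return {b: [col.count(b) for col in cols] for b in BASES}
-- ===== Notes on version B (the rewrite author's own statement) =====
-- stated objective: alternative
-- what changed: Replaces A's single incremental loop that bumps counts[ch][j] per character with a validation pass followed by a column-wise construction: the matrix is built directly as per-column counts (col.count(b)) instead of being accumulated into a mutable dict of rows.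
import Mathlib
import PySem

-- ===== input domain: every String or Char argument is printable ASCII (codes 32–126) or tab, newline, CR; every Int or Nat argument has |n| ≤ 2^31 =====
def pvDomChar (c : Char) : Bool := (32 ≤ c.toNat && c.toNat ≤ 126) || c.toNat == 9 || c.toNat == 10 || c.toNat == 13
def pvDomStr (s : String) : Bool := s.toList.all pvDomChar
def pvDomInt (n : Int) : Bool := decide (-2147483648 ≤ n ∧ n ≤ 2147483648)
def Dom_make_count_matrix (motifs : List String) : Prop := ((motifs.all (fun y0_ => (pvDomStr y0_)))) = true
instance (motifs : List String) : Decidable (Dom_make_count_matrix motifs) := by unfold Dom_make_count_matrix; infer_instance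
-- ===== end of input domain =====

-- B replaces A's incremental per-character accumulation into a dict of rows by a validation pass
-- followed by a column-wise construction (count of each base per column); same cost, different decomposition.

-- ===== PORT A =====
def pvBASES : List Char := ['A', 'C', 'G', 'T']   -- the characters of BASES = "ACGT"

-- counts = {b: [0]*L for b in BASES}
def mcmInit (L : Nat) : List (String × List Int) :=
  pvBASES.map (fun b => (String.ofList [b], List.replicate L (0 : Int)))

-- counts[ch][j] += 1  (key always present and index in range on admitted inputs)
def mcmBump (counts : List (String × List Int)) (ch : Char) (j : Nat) : List (String × List Int) :=
  (PySem.Dict.modify (⟨counts⟩ : PySem.Dict String (List Int)) (String.ofList [ch]) []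
    (fun row => row.set j (row.getD j 0 + 1))).items

-- 'for j, ch in enumerate(m): …' with the ValueError branch as none
def mcmInnerA (cs : List Char) (j : Nat) (counts : List (String × List Int)) :
    Option (List (String × List Int)) :=
  match cs with
  | [] => some counts
  | ch :: rest =>
    if ch ∈ pvBASES then mcmInnerA rest (j + 1) (mcmBump counts ch j) else none

-- 'for m in motifs: …' with the ValueError branches as none
def mcmOuterA (L : Nat) (ms : List String) (counts : List (String × List Int)) :
    Option (List (String × List Int)) :=
  match ms with
  | [] => some counts
  | m :: rest =>
    if m.toList.length = L then
      match mcmInnerA m.toList 0 counts with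
      | some c => mcmOuterA L rest c
      | none => none
    else none

def make_count_matrix (motifs : List String) : List (String × List Int) :=
  match motifs with
  | [] => []          -- motifs[0] raises IndexError: excluded by Pre_
  | m0 :: _ =>
    let L := m0.toList.length
    (mcmOuterA L motifs (mcmInit L)).getD []   -- none = ValueError: excluded by Pre_

-- ===== PORT B =====
-- pass 1 of Source B: pure validation (a raise is 'false'; excluded by Pre_)
def mcmValidB (L : Nat) (ms : List String) : Bool :=
  ms.all (fun m => m.toList.length == L && m.toList.all (fun c => decide (c ∈ pvBASES)))

def make_count_matrix_alt (motifs : List String) : List (String × List Int) :=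
  match motifs with
  | [] => []          -- len(motifs[0]) raises IndexError: excluded by Pre_
  | m0 :: _ =>
    let L := m0.toList.length
    if mcmValidB L motifs then
      -- cols = [[m[j] for m in motifs] for j in range(L)]  (index in range: len(m) = L)
      let cols := (List.range L).map (fun j => motifs.map (fun m => m.toList.getD j 'A'))
      pvBASES.map (fun b => (String.ofList [b], cols.map (fun col => (col.count b : Int))))
    else []

-- ===== PRECONDITION & SPEC =====
-- Pre_ excludes exactly the inputs where A raises: the empty list (IndexError on motifs[0]) and any
-- motif of a different length or with a character outside "ACGT" (ValueError).
def Pre_make_count_matrix (motifs : List String) : Prop :=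
  motifs ≠ [] ∧ motifs.all (fun m =>
    m.toList.length == (motifs.headD "").toList.length
      && m.toList.all (fun c => pvBASES.contains c)) = true
instance (motifs : List String) : Decidable (Pre_make_count_matrix motifs) := by
  unfold Pre_make_count_matrix; infer_instance
def pvWitness_make_count_matrix : List String := ["AC", "GT"]

def Spec_make_count_matrix (motifs : List String) (out : List (String × List Int)) : Prop :=
  out = make_count_matrix_alt motifs
instance (motifs : List String) (out : List (String × List Int)) :
    Decidable (Spec_make_count_matrix motifs out) := by unfold Spec_make_count_matrix; infer_instance

-- ===== CLAIM (what is proved, stated in full; the proofs are below) =====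
def Claim_equal_make_count_matrix : Prop := ∀ (motifs : List String),
  Dom_make_count_matrix motifs → Pre_make_count_matrix motifs →
  Spec_make_count_matrix motifs (make_count_matrix motifs)

-- ===== LEMMAS AND PROOFS =====

-- abstract state: the dict always holds exactly the four keys, in BASES order
def mkSt (st : Char → List Int) : List (String × List Int) :=
  pvBASES.map (fun b => (String.ofList [b], st b))

-- the per-base effect of scanning one motif (specification device for the proofs)
def bumpAll (row : List Int) (cs : List Char) (j : Nat) (b : Char) : List Int :=
  match cs with
  | [] => row
  | c :: rest =>
    bumpAll (if b = c then row.set j (row.getD j 0 + 1) else row) rest (j + 1) b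

theorem mcmBump_mkSt (st : Char → List Int) (ch : Char) (j : Nat) (h : ch ∈ pvBASES) :
    mcmBump (mkSt st) ch j
      = mkSt (fun b => if b = ch then (st b).set j ((st b).getD j 0 + 1) else st b) := by
  simp only [pvBASES, List.mem_cons, List.not_mem_nil, or_false] at h
  rcases h with rfl | rfl | rfl | rfl <;>
    simp [mcmBump, mkSt, pvBASES, PySem.Dict.modify, PySem.Dict.insert, PySem.Dict.getD,
      PySem.Dict.get?]

theorem mcmInnerA_mkSt (cs : List Char) (j : Nat) (st : Char → List Int)
    (h : ∀ c ∈ cs, c ∈ pvBASES) :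
    mcmInnerA cs j (mkSt st) = some (mkSt (fun b => bumpAll (st b) cs j b)) := by
  induction cs generalizing j st with
  | nil => simp [mcmInnerA, bumpAll]
  | cons c rest ih =>
    have hc : c ∈ pvBASES := h c (by simp)
    rw [mcmInnerA, if_pos hc, mcmBump_mkSt st c j hc,
      ih (j + 1) _ (fun x hx => h x (List.mem_cons_of_mem _ hx))]
    rfl

theorem mcmOuterA_mkSt (L : Nat) (ms : List String) (st : Char → List Int)
    (h : ∀ m ∈ ms, m.toList.length = L ∧ ∀ c ∈ m.toList, c ∈ pvBASES) :
    mcmOuterA L ms (mkSt st)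
      = some (mkSt (fun b => ms.foldl (fun row m => bumpAll row m.toList 0 b) (st b))) := by
  induction ms generalizing st with
  | nil => simp [mcmOuterA]
  | cons m rest ih =>
    obtain ⟨hmL, hmc⟩ := h m (by simp)
    rw [mcmOuterA, if_pos hmL, mcmInnerA_mkSt m.toList 0 st hmc]
    exact ih _ (fun x hx => h x (List.mem_cons_of_mem _ hx))

theorem bumpAll_length (row : List Int) (cs : List Char) (j : Nat) (b : Char) :
    (bumpAll row cs j b).length = row.length := by
  induction cs generalizing row j with
  | nil => rw [bumpAll]
  | cons c rest ih =>
    rw [bumpAll]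
    rcases em (b = c) with hbc | hbc
    · rw [if_pos hbc, ih, List.length_set]
    · rw [if_neg hbc, ih]

theorem bumpAll_getD_lt (row : List Int) (cs : List Char) (j q : Nat) (b : Char) (h : q < j) :
    (bumpAll row cs j b).getD q 0 = row.getD q 0 := by
  induction cs generalizing row j with
  | nil => rw [bumpAll]
  | cons c rest ih =>
    rw [bumpAll, ih _ _ (Nat.lt_succ_of_lt h)]
    by_cases hbc : b = c <;>
      simp [hbc, List.getD_eq_getElem?_getD, List.getElem?_set_ne (Nat.ne_of_gt h)]

theorem bumpAll_getD (row : List Int) (cs : List Char) (j p : Nat) (b : Char)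
    (hp : p < cs.length) (hlen : j + cs.length ≤ row.length) :
    (bumpAll row cs j b).getD (j + p) 0
      = row.getD (j + p) 0 + (if cs.getD p 'A' = b then 1 else 0) := by
  induction cs generalizing row j p with
  | nil => simp at hp
  | cons c rest ih =>
    have hj : j < row.length := by simp at hlen; omega
    rw [bumpAll]
    match p with
    | 0 =>
      have hlt : (bumpAll (if b = c then row.set j (row.getD j 0 + 1) else row) rest (j + 1) b).getD j 0
          = (if b = c then row.set j (row.getD j 0 + 1) else row).getD j 0 :=
        bumpAll_getD_lt _ _ _ _ _ (Nat.lt_succ_self j)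
      simp only [Nat.add_zero] at *
      rw [hlt]
      by_cases hbc : b = c
      · simp [hbc, List.getD_eq_getElem?_getD, List.getElem?_set_self hj]
      · have : ¬ c = b := fun e => hbc e.symm
        simp [hbc, this]
    | p' + 1 =>
      have harr : j + (p' + 1) = (j + 1) + p' := by omega
      rw [harr, ih _ (j + 1) p' (by simp at hp ⊢; omega)
        (by by_cases hbc : b = c <;> simp [hbc] at hlen ⊢ <;> omega)]
      by_cases hbc : b = c <;>
        simp [hbc, List.getD_eq_getElem?_getD, List.getElem?_set_ne (by omega : j ≠ j + 1 + p')]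

theorem foldl_bump_length (ms : List String) (row : List Int) (b : Char) :
    (ms.foldl (fun row m => bumpAll row m.toList 0 b) row).length = row.length := by
  induction ms generalizing row with
  | nil => rfl
  | cons m rest ih => rw [List.foldl_cons, ih, bumpAll_length]

theorem foldl_bump_getD (ms : List String) (row : List Int) (b : Char) (p : Nat)
    (hlen : ∀ m ∈ ms, m.toList.length = row.length) (hp : p < row.length) :
    (ms.foldl (fun row m => bumpAll row m.toList 0 b) row).getD p 0
      = row.getD p 0 + ((ms.map (fun m => m.toList.getD p 'A')).count b : Int) := by
  induction ms generalizing row with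
  | nil => simp
  | cons m rest ih =>
    have hmL : m.toList.length = row.length := hlen m (by simp)
    rw [List.foldl_cons,
      ih (bumpAll row m.toList 0 b)
        (fun x hx => by rw [hlen x (List.mem_cons_of_mem _ hx), bumpAll_length])
        (by rw [bumpAll_length]; exact hp)]
    have hb := bumpAll_getD row m.toList 0 p b (by omega) (by omega)
    rw [Nat.zero_add] at hb
    rw [hb, List.map_cons, List.count_cons]
    push_cast
    simp only [beq_iff_eq]
    ring

theorem mcmValidB_true (L : Nat) (ms : List String)
    (h : ∀ m ∈ ms, m.toList.length = L ∧ ∀ c ∈ m.toList, c ∈ pvBASES) :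
    mcmValidB L ms = true := by
  rw [mcmValidB, List.all_eq_true]
  intro m hm
  obtain ⟨h1, h2⟩ := h m hm
  rw [Bool.and_eq_true, beq_iff_eq, List.all_eq_true]
  exact ⟨h1, fun c hc => decide_eq_true (h2 c hc)⟩

-- ===== VERDICT (by name: the statement is the Claim_ definition above) =====
theorem make_count_matrix_spec : Claim_equal_make_count_matrix := by
  intro motifs _ hpre
  obtain ⟨hne, hallb⟩ := hpre
  have hall0 : ∀ m ∈ motifs,
      m.toList.length = (motifs.headD "").toList.length ∧ ∀ c ∈ m.toList, c ∈ pvBASES := by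
    intro m hm
    have := (List.all_eq_true.mp hallb) m hm
    simpa using this
  match motifs with
  | [] => exact absurd rfl hne
  | m0 :: rest =>
    unfold Spec_make_count_matrix
    have hall : ∀ m ∈ m0 :: rest,
        m.toList.length = m0.toList.length ∧ ∀ c ∈ m.toList, c ∈ pvBASES := by
      simpa only [List.headD_cons] using hall0
    have hA : make_count_matrix (m0 :: rest)
        = (mcmOuterA m0.toList.length (m0 :: rest) (mcmInit m0.toList.length)).getD [] := rfl
    have hB : make_count_matrix_alt (m0 :: rest)
        = if mcmValidB m0.toList.length (m0 :: rest)
          then pvBASES.map (fun b => (String.ofList [b],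
            (((List.range m0.toList.length).map
                (fun j => (m0 :: rest).map (fun m => m.toList.getD j 'A'))).map
              (fun col => (col.count b : Int)))))
          else [] := rfl
    rw [hA, hB,
      show mcmInit m0.toList.length = mkSt (fun _ => List.replicate m0.toList.length 0) from rfl,
      mcmOuterA_mkSt _ _ _ hall, mcmValidB_true _ _ hall, if_pos rfl]
    unfold mkSt
    apply List.map_congr_left
    intro b _
    refine Prod.ext rfl ?_
    apply List.ext_getElem
    · dsimp only
      rw [foldl_bump_length]
      simp
    · intro i h1 h2
      dsimp only at h1 h2 ⊢
      have hlenrow : ∀ m ∈ m0 :: rest,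
          m.toList.length = (List.replicate m0.toList.length (0 : Int)).length := by
        intro m hm; simpa using (hall m hm).1
      have hfold := foldl_bump_getD (m0 :: rest) (List.replicate m0.toList.length 0) b i hlenrow
        (by rw [foldl_bump_length] at h1; exact h1)
      rw [List.getD_eq_getElem _ _ h1] at hfold
      have hiL : i < m0.toList.length := by
        rw [foldl_bump_length] at h1; simpa using h1
      rw [hfold, List.getD_replicate]
      · simp
      · exact hiL
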